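-- pv_equiv track=rewrite | github.com/SAG145/Project-Euler | PEP351 - Hexagonal Orchards.py | all_totient
-- ===== SOURCE A (Python) =====
-- def all_totient(n):
--     tots = [1]*(n + 1)
--     for p in range(2,n + 1):
--         if tots[p] == 1:
--             for k in range(p,n + 1,p):
--                 if tots[k] == 1:
--                     tots[k] = k
--                 tots[k] = (tots[k]*(p - 1)) // p
--     return tots
-- ===== SOURCE B (Python) =====
-- def all_totient(n):
--     # Divisor-sum sieve: phi(k) = k - sum of phi(d) over proper divisors d of k
--     # (Gauss's identity sum_{d|k} phi(d) = k). Slot 0 is 1 by the same convention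
--     # the original uses (phi[0] = phi[1] = 1).
--     if n < 0:
--         return []
--     phi = [1] + list(range(1, n + 1))
--     for i in range(1, n + 1):
--         for j in range(2 * i, n + 1, i):
--             phi[j] -= phi[i]
--     return phi
-- ===== Notes on version B (the rewrite author's own statement) =====
-- stated objective: alternative
-- what changed: Replaces the prime-sieve with multiplicative (p-1)/p updates and a primality test by a divisor-sum sieve based on Gauss's identity (phi(k) = k minus the sum of phi over proper divisors), using only subtraction and no primality check or division.
import Mathlib
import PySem

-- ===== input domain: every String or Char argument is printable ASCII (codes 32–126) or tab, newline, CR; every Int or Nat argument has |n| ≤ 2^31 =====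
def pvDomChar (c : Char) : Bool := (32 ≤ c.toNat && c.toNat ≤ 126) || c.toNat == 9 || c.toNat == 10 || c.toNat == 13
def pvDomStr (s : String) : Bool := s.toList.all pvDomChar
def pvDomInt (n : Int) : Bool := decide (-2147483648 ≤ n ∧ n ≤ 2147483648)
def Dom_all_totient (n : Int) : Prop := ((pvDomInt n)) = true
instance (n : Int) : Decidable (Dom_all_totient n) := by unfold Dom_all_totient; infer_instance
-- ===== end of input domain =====

-- B replaces A's prime sieve (primality test + multiplicative (p-1)/p updates with integer
-- division) by a divisor-sum sieve using Gauss's identity (phi(k) = k minus the sum of phi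
-- over the proper divisors of k), needing only subtraction; both return the same list.

-- ===== PORT A =====
-- inner loop: for k in range(p, n+1, p): if tots[k]==1: tots[k]=k; tots[k]=(tots[k]*(p-1))//p
def A_inner (n p : Int) (tots : List Int) : List Int :=
  (PySem.List.pyRange p (n + 1) p).foldl (fun tots k =>
    let tots := if PySem.List.pyGetD tots k 0 = 1 then PySem.List.pySetD tots k k else tots
    PySem.List.pySetD tots k (PySem.Int.floordiv (PySem.List.pyGetD tots k 0 * (p - 1)) p)) tots

-- outer body: if tots[p] == 1 then run the inner loop
def A_outer (n : Int) (tots : List Int) (p : Int) : List Int :=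
  if PySem.List.pyGetD tots p 0 = 1 then A_inner n p tots else tots

def all_totient (n : Int) : List Int :=
  (PySem.List.pyRange 2 (n + 1) 1).foldl (A_outer n) (List.replicate (n + 1).toNat 1)

-- ===== PORT B =====
-- inner loop: for j in range(2*i, n+1, i): phi[j] -= phi[i]
def B_inner (n i : Int) (phi : List Int) : List Int :=
  (PySem.List.pyRange (2 * i) (n + 1) i).foldl (fun phi j =>
    PySem.List.pySetD phi j (PySem.List.pyGetD phi j 0 - PySem.List.pyGetD phi i 0)) phi

def all_totient_alt (n : Int) : List Int :=
  if n < 0 then []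
  else
    (PySem.List.pyRange 1 (n + 1) 1).foldl (fun phi i => B_inner n i phi)
      (1 :: PySem.List.pyRange 1 (n + 1) 1)

-- ===== PRECONDITION & SPEC =====
def Spec_all_totient (n : Int) (out : List Int) : Prop := out = all_totient_alt n
instance (n : Int) (out : List Int) : Decidable (Spec_all_totient n out) := by unfold Spec_all_totient; infer_instance

-- ===== CLAIM (what is proved, stated in full; the proofs are below) =====
def Claim_equal_all_totient : Prop := ∀ (n : Int), Dom_all_totient n → Spec_all_totient n (all_totient n)

-- ===== LEMMAS AND PROOFS =====

-- the common value of entry k of both lists (phi(k), with slots 0 and 1 holding 1)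
def tgt (k : ℕ) : Int := if k = 0 then 1 else (k.totient : Int)

-- primes q ≤ P dividing k
def pdiv (P k : ℕ) : Finset ℕ := (Finset.range (P + 1)).filter (fun q => Nat.Prime q ∧ q ∣ k)

-- A's entry k after the outer loop has processed p = 2..P
def aval (P k : ℕ) : Int :=
  if pdiv P k = ∅ then 1
  else ((k / ∏ q ∈ pdiv P k, q) * ∏ q ∈ pdiv P k, (q - 1) : ℕ)

def avalF (P k : ℕ) : Int := if k = 0 then 1 else aval P k

-- divisors d ≤ I of k other than k itself
def bdiv (I k : ℕ) : Finset ℕ := (Finset.range (I + 1)).filter (fun d => d ∣ k ∧ d ≠ k)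

-- B's entry k after the outer loop has processed i = 1..I
def bval (I k : ℕ) : Int :=
  if k = 0 then 1 else (k : Int) - ∑ d ∈ bdiv I k, (Nat.totient d : Int)

-- A's inner-loop update as a function of index and old value
def gA (p k x : Int) : Int := PySem.Int.floordiv ((if x = 1 then k else x) * (p - 1)) p

-- B's inner-loop update (subtract the constant c = phi[i]); the index argument is unused
def gB (c _k x : Int) : Int := x - c

lemma pyGetD_oob (xs : List Int) (i d : Int) (h0 : 0 ≤ i) (h : ¬ i < (xs.length : Int)) :
    PySem.List.pyGetD xs i d = d := by
  simp [PySem.List.pyGetD, PySem.List.pyGet?, PySem.List.pyIdx?, h0, h]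

lemma pySetD_oob (xs : List Int) (i v : Int) (h0 : 0 ≤ i) (h : ¬ i < (xs.length : Int)) :
    PySem.List.pySetD xs i v = xs := by
  simp [PySem.List.pySetD, PySem.List.pySet?, PySem.List.pyIdx?, h0, h]

lemma pyGetD_set_ne (xs : List Int) (a b v : Int) (h0a : 0 ≤ a) (h0b : 0 ≤ b) (hne : a ≠ b) :
    PySem.List.pyGetD (PySem.List.pySetD xs b v) a 0 = PySem.List.pyGetD xs a 0 := by
  rw [PySem.List.pySetD_of_nonneg xs v h0b]
  by_cases ha : a < (xs.length : Int)
  · rw [PySem.List.pyGetD_eq_getElem _ 0 h0a (by simpa using ha),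
        PySem.List.pyGetD_eq_getElem _ 0 h0a ha, List.getElem_set]
    have : b.toNat ≠ a.toNat := by omega
    simp [this]
  · rw [pyGetD_oob _ _ _ h0a (by simpa using ha), pyGetD_oob _ _ _ h0a ha]

-- pointwise characterisation of a fold of single-index updates over distinct in-range indices
lemma batch_char (g : Int → Int → Int) :
    ∀ (idxs : List Int) (xs : List Int), idxs.Nodup →
    (∀ i ∈ idxs, 0 ≤ i ∧ i.toNat < xs.length) → ∀ j : ℕ,
    (idxs.foldl (fun s k => PySem.List.pySetD s k (g k (PySem.List.pyGetD s k 0))) xs)[j]? =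
      if (j : Int) ∈ idxs then (xs[j]?).map (g j) else xs[j]? := by
  intro idxs
  induction idxs with
  | nil => intro xs _ _ j; simp
  | cons k rest ih =>
    intro xs hnd hval j
    have hk := hval k (List.mem_cons_self ..)
    have h0k : 0 ≤ k := hk.1
    have hkl : k.toNat < xs.length := hk.2
    have hkl' : k < (xs.length : Int) := by omega
    simp only [List.foldl_cons]
    rw [PySem.List.pySetD_of_nonneg xs _ h0k, PySem.List.pyGetD_eq_getElem xs 0 h0k hkl']
    have hnd' : rest.Nodup := (List.nodup_cons.mp hnd).2
    have hkr : k ∉ rest := (List.nodup_cons.mp hnd).1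
    have hval' : ∀ i ∈ rest, 0 ≤ i ∧ i.toNat < (xs.set k.toNat (g k xs[k.toNat])).length := by
      intro i hi; have := hval i (List.mem_cons_of_mem _ hi); simpa using this
    rw [ih _ hnd' hval' j]
    by_cases hjr : (j : Int) ∈ rest
    · have hjk : j ≠ k.toNat := by
        rintro rfl
        apply hkr
        have hc : ((k.toNat : ℕ) : Int) = k := by omega
        rwa [hc] at hjr
      have hx : (xs.set k.toNat (g k xs[k.toNat]))[j]? = xs[j]? := by
        rw [List.getElem?_set, if_neg (by omega : ¬ k.toNat = j)]
      rw [if_pos hjr, if_pos (List.mem_cons.mpr (Or.inr hjr)), hx]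
    · by_cases hjk : (j : Int) = k
      · have hj : j = k.toNat := by omega
        subst hj
        rw [if_neg hjr, if_pos (List.mem_cons.mpr (Or.inl hjk))]
        rw [List.getElem?_set, if_pos rfl, if_pos hkl, List.getElem?_eq_getElem hkl]
        simp only [Option.map_some]
        rw [hjk]
      · have hx : (xs.set k.toNat (g k xs[k.toNat]))[j]? = xs[j]? := by
        -- j is neither k nor in rest
          rw [List.getElem?_set, if_neg (by omega : ¬ k.toNat = j)]
        rw [if_neg hjr, if_neg (by simp [List.mem_cons, hjk, hjr]), hx]

-- A's inner loop in batch form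
lemma A_inner_batch (n p : Int) (h2 : 2 ≤ p) (tots : List Int) :
    A_inner n p tots = (PySem.List.pyRange p (n + 1) p).foldl
      (fun s k => PySem.List.pySetD s k (gA p k (PySem.List.pyGetD s k 0))) tots := by
  apply PySem.List.foldl_congr_mem
  intro s k hk
  have hpk : p ≤ k := ((PySem.List.mem_pyRange_iff_of_pos (by omega) k).mp hk).1
  have h0 : 0 ≤ k := by omega
  by_cases hin : k < (s.length : Int)
  · by_cases h1 : PySem.List.pyGetD s k 0 = 1
    · have hset : PySem.List.pyGetD (PySem.List.pySetD s k k) k 0 = k := by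
        rw [PySem.List.pySetD_of_nonneg s k h0,
            PySem.List.pyGetD_eq_getElem _ 0 h0 (by simpa using hin), List.getElem_set]
        simp
      rw [if_pos h1]
      show PySem.List.pySetD (PySem.List.pySetD s k k) k
            (PySem.Int.floordiv (PySem.List.pyGetD (PySem.List.pySetD s k k) k 0 * (p - 1)) p)
          = PySem.List.pySetD s k (gA p k (PySem.List.pyGetD s k 0))
      rw [hset, gA, h1, if_pos rfl,
          PySem.List.pySetD_of_nonneg s k h0, PySem.List.pySetD_of_nonneg _ _ h0,
          PySem.List.pySetD_of_nonneg s _ h0, List.set_set]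
    · rw [if_neg h1]
      show PySem.List.pySetD s k (PySem.Int.floordiv (PySem.List.pyGetD s k 0 * (p - 1)) p)
          = PySem.List.pySetD s k (gA p k (PySem.List.pyGetD s k 0))
      rw [gA, if_neg h1]
  · have hg : PySem.List.pyGetD s k 0 = 0 := pyGetD_oob _ _ _ h0 hin
    rw [hg, if_neg (by decide : ¬ (0:Int) = 1)]
    show PySem.List.pySetD s k (PySem.Int.floordiv (PySem.List.pyGetD s k 0 * (p - 1)) p)
        = PySem.List.pySetD s k (gA p k 0)
    rw [hg, gA, if_neg (by decide : ¬ (0:Int) = 1), pySetD_oob _ _ _ h0 hin]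

-- B's inner loop reads phi[i] only at indices it never writes
lemma foldl_sub_const (i : Int) (h0 : 0 ≤ i) :
    ∀ (idxs : List Int) (xs : List Int), (∀ j ∈ idxs, i < j) →
    idxs.foldl (fun s j => PySem.List.pySetD s j
        (PySem.List.pyGetD s j 0 - PySem.List.pyGetD s i 0)) xs
    = idxs.foldl (fun s j => PySem.List.pySetD s j
        (PySem.List.pyGetD s j 0 - PySem.List.pyGetD xs i 0)) xs := by
  intro idxs
  induction idxs with
  | nil => intro xs _; rfl
  | cons j rest ih =>
    intro xs hlt
    have hij : i < j := hlt j (List.mem_cons_self ..)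
    simp only [List.foldl_cons]
    set xs' := PySem.List.pySetD xs j (PySem.List.pyGetD xs j 0 - PySem.List.pyGetD xs i 0) with hxs'
    have hread : PySem.List.pyGetD xs' i 0 = PySem.List.pyGetD xs i 0 := by
      rw [hxs']; exact pyGetD_set_ne xs i j _ h0 (by omega) (by omega)
    rw [ih xs' (fun j' hj' => hlt j' (List.mem_cons_of_mem _ hj')), ← hread]

lemma nodup_pyRange_pos (a b s : Int) (hs : 0 < s) : (PySem.List.pyRange a b s).Nodup := by
  rw [PySem.List.pyRange_of_pos a b hs]
  refine List.Nodup.map ?_ List.nodup_range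
  intro x y hxy
  have h1 : s * (x : Int) = s * (y : Int) := by
    have := add_left_cancel hxy
    linarith
  have h2 : (x : Int) = (y : Int) := mul_left_cancel₀ (by omega) h1
  exact_mod_cast h2

-- ---------- arithmetic about aval ----------

lemma pdiv_one (k : ℕ) : pdiv 1 k = ∅ := by
  ext q
  simp only [pdiv, Finset.mem_filter, Finset.mem_range, Finset.notMem_empty, iff_false]
  rintro ⟨hq, hp, -⟩
  interval_cases q <;> revert hp <;> decide

lemma pdiv_subset_primeFactors (P k : ℕ) (hk : k ≠ 0) : pdiv P k ⊆ k.primeFactors := by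
  intro q hq
  simp only [pdiv, Finset.mem_filter] at hq
  exact Nat.mem_primeFactors.mpr ⟨hq.2.1, hq.2.2, hk⟩

lemma prod_pdiv_dvd (P k : ℕ) (hk : k ≠ 0) : (∏ q ∈ pdiv P k, q) ∣ k :=
  dvd_trans (Finset.prod_dvd_prod_of_subset _ _ _ (pdiv_subset_primeFactors P k hk))
    (Nat.prod_primeFactors_dvd k)

lemma aval_eq_one_iff (p k : ℕ) (h2 : 2 ≤ p) (hpk : p ≤ k) :
    aval (p - 1) k = 1 ↔ pdiv (p - 1) k = ∅ := by
  constructor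
  · intro h
    by_contra hne
    have hk0 : k ≠ 0 := by omega
    rw [aval, if_neg hne] at h
    have h' : (k / ∏ q ∈ pdiv (p - 1) k, q) * ∏ q ∈ pdiv (p - 1) k, (q - 1) = 1 := by
      exact_mod_cast h
    obtain ⟨hd1, he1⟩ := mul_eq_one.mp h'
    have hr : (∏ q ∈ pdiv (p - 1) k, q) ∣ k := prod_pdiv_dvd _ _ hk0
    have hkr : k = ∏ q ∈ pdiv (p - 1) k, q := by
      calc k = k / (∏ q ∈ pdiv (p - 1) k, q) * ∏ q ∈ pdiv (p - 1) k, q :=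
              (Nat.div_mul_cancel hr).symm
        _ = 1 * ∏ q ∈ pdiv (p - 1) k, q := by rw [hd1]
        _ = ∏ q ∈ pdiv (p - 1) k, q := one_mul _
    have hall : ∀ q ∈ pdiv (p - 1) k, q - 1 = 1 := by
      refine (Finset.prod_eq_one_iff_of_one_le' ?_).mp he1
      intro q hq
      have := (Finset.mem_filter.mp hq).2.1.two_le
      omega
    have hall2 : ∀ q ∈ pdiv (p - 1) k, q = 2 := by
      intro q hq
      have h2q := (Finset.mem_filter.mp hq).2.1.two_le
      have := hall q hq
      omega
    obtain ⟨q0, hq0⟩ := Finset.nonempty_iff_ne_empty.mpr hne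
    have hset : pdiv (p - 1) k = {2} :=
      Finset.eq_singleton_iff_nonempty_unique_mem.mpr ⟨⟨q0, hq0⟩, hall2⟩
    rw [hset, Finset.prod_singleton] at hkr
    have h2mem : (2 : ℕ) ∈ pdiv (p - 1) k := by rw [hset]; exact Finset.mem_singleton_self 2
    have hlt := Finset.mem_range.mp (Finset.mem_filter.mp h2mem).1
    omega
  · intro h; rw [aval, if_pos h]

lemma aval_self_eq_one_iff (p : ℕ) (h2 : 2 ≤ p) : aval (p - 1) p = 1 ↔ p.Prime := by
  rw [aval_eq_one_iff p p h2 le_rfl]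
  constructor
  · intro h
    by_contra hnp
    have hm : p.minFac.Prime := Nat.minFac_prime (by omega)
    have hmd : p.minFac ∣ p := Nat.minFac_dvd p
    have hlt : p.minFac < p := by
      rcases (Nat.le_of_dvd (by omega) hmd).lt_or_eq with h' | h'
      · exact h'
      · exact absurd (h' ▸ hm) hnp
    have hmem : p.minFac ∈ pdiv (p - 1) p := by
      simp only [pdiv, Finset.mem_filter, Finset.mem_range]
      exact ⟨by omega, hm, hmd⟩
    rw [h] at hmem
    exact absurd hmem (Finset.notMem_empty _)
  · intro hp
    ext q
    simp only [pdiv, Finset.mem_filter, Finset.mem_range, Finset.notMem_empty, iff_false]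
    rintro ⟨hq, hqp, hqd⟩
    have h2q := hqp.two_le
    rcases (Nat.Prime.eq_one_or_self_of_dvd hp q hqd) with h' | h' <;> omega

lemma pdiv_succ_of_not (p k : ℕ) (h1 : 1 ≤ p) (h : ¬ (p.Prime ∧ p ∣ k)) :
    pdiv p k = pdiv (p - 1) k := by
  ext q
  simp only [pdiv, Finset.mem_filter, Finset.mem_range]
  constructor
  · rintro ⟨hq, hP, hd⟩
    refine ⟨?_, hP, hd⟩
    rcases Nat.lt_succ_iff_lt_or_eq.mp hq with h' | h'
    · omega
    · exact absurd ⟨h' ▸ hP, h' ▸ hd⟩ h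
  · rintro ⟨hq, hP, hd⟩; exact ⟨by omega, hP, hd⟩

lemma pdiv_succ_of_yes (p k : ℕ) (h1 : 1 ≤ p) (hp : p.Prime) (hd : p ∣ k) :
    pdiv p k = insert p (pdiv (p - 1) k) := by
  ext q
  simp only [pdiv, Finset.mem_filter, Finset.mem_range, Finset.mem_insert]
  constructor
  · rintro ⟨hq, hP, hdq⟩
    rcases Nat.lt_succ_iff_lt_or_eq.mp hq with h' | h'
    · exact Or.inr ⟨by omega, hP, hdq⟩
    · exact Or.inl h'
  · rintro (rfl | ⟨hq, hP, hdq⟩)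
    · exact ⟨by omega, hp, hd⟩
    · exact ⟨by omega, hP, hdq⟩

lemma p_not_mem_pdiv_pred (p k : ℕ) : p ∉ pdiv (p - 1) k := by
  simp only [pdiv, Finset.mem_filter, Finset.mem_range]
  rintro ⟨hq, hP, -⟩
  have := hP.two_le
  omega

lemma stepA_val (p k : ℕ) (hp : p.Prime) (hdk : p ∣ k) (hpk : p ≤ k) :
    gA p k (aval (p - 1) k) = aval p k := by
  have h2 : 2 ≤ p := hp.two_le
  have hk0 : k ≠ 0 := by omega
  have hins : pdiv p k = insert p (pdiv (p - 1) k) := pdiv_succ_of_yes p k (by omega) hp hdk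
  have hnm : p ∉ pdiv (p - 1) k := p_not_mem_pdiv_pred p k
  have hpne : pdiv p k ≠ ∅ := by rw [hins]; exact Finset.insert_ne_empty _ _
  have hcast : ((p : ℕ) : Int) - 1 = ((p - 1 : ℕ) : Int) := by omega
  by_cases hS : pdiv (p - 1) k = ∅
  · have hold : aval (p - 1) k = 1 := by rw [aval, if_pos hS]
    obtain ⟨t, ht⟩ := hdk
    rw [hold, gA, if_pos rfl, aval, if_neg hpne, hins, Finset.prod_insert hnm,
        Finset.prod_insert hnm, hS, Finset.prod_empty, Finset.prod_empty,
        hcast, ← Nat.cast_mul, PySem.Int.floordiv_natCast]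
    congr 1
    simp only [mul_one]
    rw [ht]
    have h1 : p * t * (p - 1) = p * (t * (p - 1)) := by ring
    rw [h1, Nat.mul_div_cancel_left _ (by omega : 0 < p),
        Nat.mul_div_cancel_left _ (by omega : 0 < p)]
  · have holdne : aval (p - 1) k ≠ 1 := fun h => hS ((aval_eq_one_iff p k h2 hpk).mp h)
    have hold : aval (p - 1) k
        = ((k / ∏ q ∈ pdiv (p - 1) k, q) * ∏ q ∈ pdiv (p - 1) k, (q - 1) : ℕ) := by
      rw [aval, if_neg hS]
    have hrd : (∏ q ∈ pdiv (p - 1) k, q) ∣ k := prod_pdiv_dvd _ _ hk0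
    have hpr : ¬ p ∣ ∏ q ∈ pdiv (p - 1) k, q := by
      intro hd
      obtain ⟨q, hq, hpq⟩ := ((Nat.Prime.prime hp).dvd_finset_prod_iff _).mp hd
      have hq2 : q.Prime := (Finset.mem_filter.mp hq).2.1
      have hqe : p = q := (Nat.prime_dvd_prime_iff_eq hp hq2).mp hpq
      have hqlt := Finset.mem_range.mp (Finset.mem_filter.mp hq).1
      omega
    have hcop : Nat.Coprime p (∏ q ∈ pdiv (p - 1) k, q) :=
      (Nat.Prime.coprime_iff_not_dvd hp).mpr hpr
    have hprd : p * (∏ q ∈ pdiv (p - 1) k, q) ∣ k :=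
      Nat.Coprime.mul_dvd_of_dvd_of_dvd hcop hdk hrd
    have hp0 : 0 < p := by omega
    set r := ∏ q ∈ pdiv (p - 1) k, q with hrdef
    set e := ∏ q ∈ pdiv (p - 1) k, (q - 1) with hedef
    obtain ⟨t, ht⟩ := hprd
    have hr0 : 0 < r := by
      rw [hrdef]
      apply Finset.prod_pos
      intro q hq
      exact (Finset.mem_filter.mp hq).2.1.pos
    have hkr : k / r = p * t := by
      have hre : p * r * t = p * t * r := by ring
      rw [ht, hre, Nat.mul_div_cancel _ hr0]
    have hkpr : k / (p * r) = t := by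
      rw [ht, Nat.mul_div_cancel_left t (by positivity)]
    rw [gA, if_neg holdne, hold, aval, if_neg hpne, hins,
        Finset.prod_insert hnm, Finset.prod_insert hnm,
        hcast, ← Nat.cast_mul, PySem.Int.floordiv_natCast]
    congr 1
    rw [hkr, hkpr]
    have h1 : p * t * e * (p - 1) = p * (t * ((p - 1) * e)) := by ring
    rw [h1, Nat.mul_div_cancel_left _ hp0]

lemma aval_final (n k : ℕ) (h2 : 2 ≤ k) (hkn : k ≤ n) : aval n k = (k.totient : Int) := by
  have hk0 : k ≠ 0 := by omega
  have hpd : pdiv n k = k.primeFactors := by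
    apply Finset.Subset.antisymm (pdiv_subset_primeFactors n k hk0)
    intro q hq
    obtain ⟨hqp, hqd, -⟩ := Nat.mem_primeFactors.mp hq
    have hqle : q ≤ k := Nat.le_of_dvd (by omega) hqd
    simp only [pdiv, Finset.mem_filter, Finset.mem_range]
    exact ⟨by omega, hqp, hqd⟩
  have hne : k.primeFactors ≠ ∅ :=
    Finset.nonempty_iff_ne_empty.mp (Nat.nonempty_primeFactors.mpr (by omega))
  rw [aval, hpd, if_neg hne]
  have hmul : k.totient * ∏ q ∈ k.primeFactors, q = k * ∏ q ∈ k.primeFactors, (q - 1) :=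
    Nat.totient_mul_prod_primeFactors k
  have hrd : (∏ q ∈ k.primeFactors, q) ∣ k := Nat.prod_primeFactors_dvd k
  have hr0 : 0 < ∏ q ∈ k.primeFactors, q :=
    Finset.prod_pos (fun q hq => (Nat.prime_of_mem_primeFactors hq).pos)
  set r := ∏ q ∈ k.primeFactors, q with hrdef
  set e := ∏ q ∈ k.primeFactors, (q - 1) with hedef
  obtain ⟨t, ht⟩ := hrd
  have hmul2 : k.totient * r = (t * e) * r := by rw [hmul, ht]; ring
  have htot : k.totient = t * e := Nat.eq_of_mul_eq_mul_right hr0 hmul2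
  have hdiv : k / r = t := by rw [ht, Nat.mul_div_cancel_left t hr0]
  rw [hdiv, ← htot]

lemma aval_one (P : ℕ) : aval P 1 = 1 := by
  have : pdiv P 1 = ∅ := by
    ext q
    simp only [pdiv, Finset.mem_filter, Finset.mem_range, Finset.notMem_empty, iff_false]
    rintro ⟨-, hP, hd⟩
    have := Nat.eq_one_of_dvd_one hd
    exact hP.one_lt.ne' (by omega)
  simp [aval, this]

-- ---------- arithmetic about bval ----------

lemma bdiv_zero (k : ℕ) (hk : 1 ≤ k) : bdiv 0 k = ∅ := by
  ext d
  simp only [bdiv, Finset.mem_filter, Finset.mem_range, Finset.notMem_empty, iff_false]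
  rintro ⟨hd, hdk, -⟩
  interval_cases d
  exact absurd (Nat.eq_zero_of_zero_dvd hdk) (by omega)

lemma bdiv_eq_proper (I k : ℕ) (hk : 1 ≤ k) (hI : k - 1 ≤ I) :
    bdiv I k = k.divisors.erase k := by
  ext d
  simp only [bdiv, Finset.mem_filter, Finset.mem_range, Finset.mem_erase, Nat.mem_divisors]
  constructor
  · rintro ⟨hd, hdk, hne⟩; exact ⟨hne, hdk, by omega⟩
  · rintro ⟨hne, hdk, -⟩
    have hdle : d ≤ k := Nat.le_of_dvd (by omega) hdk
    exact ⟨by omega, hdk, hne⟩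

lemma bval_eq_totient (I k : ℕ) (hk : 1 ≤ k) (hI : k - 1 ≤ I) :
    bval I k = (k.totient : Int) := by
  have hsum : k.totient + ∑ d ∈ k.divisors.erase k, Nat.totient d = k := by
    rw [Finset.add_sum_erase _ _ (Nat.mem_divisors_self k (by omega))]
    exact Nat.sum_totient k
  have hsum' : (k.totient : Int) + ∑ d ∈ k.divisors.erase k, (Nat.totient d : Int) = k := by
    exact_mod_cast hsum
  rw [bval, if_neg (by omega), bdiv_eq_proper I k hk hI]
  omega

lemma stepB_val (i k : ℕ) (h1 : 1 ≤ i) (hik : i ∣ k) (h2k : 2 * i ≤ k) :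
    bval i k = bval (i - 1) k - (i.totient : Int) := by
  have hne : i ≠ k := by omega
  have hins : bdiv i k = insert i (bdiv (i - 1) k) := by
    ext d
    simp only [bdiv, Finset.mem_filter, Finset.mem_range, Finset.mem_insert]
    constructor
    · rintro ⟨hd, hdk, hdne⟩
      rcases Nat.lt_succ_iff_lt_or_eq.mp hd with h' | h'
      · exact Or.inr ⟨by omega, hdk, hdne⟩
      · exact Or.inl h'
    · rintro (rfl | ⟨hd, hdk, hdne⟩)
      · exact ⟨by omega, hik, hne⟩
      · exact ⟨by omega, hdk, hdne⟩
  have hnotmem : i ∉ bdiv (i - 1) k := by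
    simp only [bdiv, Finset.mem_filter, Finset.mem_range]
    rintro ⟨hd, -, -⟩; omega
  rw [bval, bval, if_neg (by omega), if_neg (by omega), hins,
      Finset.sum_insert hnotmem]
  ring

lemma bval_succ_of_not (i k : ℕ) (h1 : 1 ≤ i) (h : ¬ (i ∣ k ∧ i ≠ k)) :
    bval i k = bval (i - 1) k := by
  have : bdiv i k = bdiv (i - 1) k := by
    ext d
    simp only [bdiv, Finset.mem_filter, Finset.mem_range]
    constructor
    · rintro ⟨hd, hdk, hdne⟩
      rcases Nat.lt_succ_iff_lt_or_eq.mp hd with h' | h'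
      · exact ⟨by omega, hdk, hdne⟩
      · exact absurd ⟨h' ▸ hdk, h' ▸ hdne⟩ h
    · rintro ⟨hd, hdk, hdne⟩; exact ⟨by omega, hdk, hdne⟩
  rw [bval, bval, this]

-- ---------- the outer loops ----------

lemma bval_zero (k : ℕ) (hk : 1 ≤ k) : bval 0 k = (k : Int) := by
  rw [bval, if_neg (by omega), bdiv_zero k hk, Finset.sum_empty, sub_zero]

lemma stepA_main (n p : ℕ) (h2 : 2 ≤ p) (hpn : p ≤ n) :
    A_outer (n : Int) ((List.range (n + 1)).map (fun k => avalF (p - 1) k)) (p : Int)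
      = (List.range (n + 1)).map (fun k => avalF p k) := by
  have hp0 : (0 : Int) ≤ (p : Int) := by positivity
  have hlen : ((List.range (n + 1)).map (fun k => avalF (p - 1) k)).length = n + 1 := by simp
  have hread : PySem.List.pyGetD ((List.range (n + 1)).map (fun k => avalF (p - 1) k)) (p : Int) 0
      = aval (p - 1) p := by
    rw [PySem.List.pyGetD_eq_getElem _ 0 hp0
        (by rw [hlen]; exact_mod_cast Nat.lt_succ_of_le hpn)]
    have ht : ((p : ℕ) : Int).toNat = p := by omega
    simp only [ht, List.getElem_map, List.getElem_range, avalF, if_neg (by omega : ¬ p = 0)]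
  rw [A_outer, hread]
  by_cases hp : p.Prime
  · rw [if_pos ((aval_self_eq_one_iff p h2).mpr hp),
        A_inner_batch _ _ (by exact_mod_cast h2)]
    have hstep : (0 : Int) < (p : Int) := by positivity
    apply List.ext_getElem?
    intro j
    have hval : ∀ i ∈ PySem.List.pyRange (p : Int) ((n : Int) + 1) (p : Int),
        0 ≤ i ∧ i.toNat < ((List.range (n + 1)).map (fun k => avalF (p - 1) k)).length := by
      intro i hi
      obtain ⟨hi1, hi2, -⟩ := (PySem.List.mem_pyRange_iff_of_pos hstep i).mp hi
      exact ⟨by omega, by rw [hlen]; omega⟩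
    rw [batch_char (gA (p : Int)) _ _ (nodup_pyRange_pos _ _ _ hstep) hval j]
    by_cases hj : j < n + 1
    · have hm1 : ((List.range (n + 1)).map (fun k => avalF (p - 1) k))[j]?
          = some (avalF (p - 1) j) := by simp [hj]
      have hm2 : ((List.range (n + 1)).map (fun k => avalF p k))[j]?
          = some (avalF p j) := by simp [hj]
      rw [hm1, hm2]
      by_cases hmem : (j : Int) ∈ PySem.List.pyRange (p : Int) ((n : Int) + 1) (p : Int)
      · obtain ⟨hj1, hj2, hj3⟩ := (PySem.List.mem_pyRange_iff_of_pos hstep _).mp hmem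
        have hpj : p ∣ j := by
          have h4 : (p : Int) ∣ (j : Int) := by
            have h5 := dvd_add hj3 (dvd_refl (p : Int))
            simpa using h5
          exact_mod_cast h4
        have hpj' : p ≤ j := by exact_mod_cast hj1
        rw [if_pos hmem]
        simp only [Option.map_some]
        congr 1
        simp only [avalF, if_neg (by omega : ¬ j = 0)]
        exact stepA_val p j hp hpj hpj'
      · rw [if_neg hmem]
        congr 1
        by_cases hj0 : j = 0
        · subst hj0; rfl
        · have hnd : ¬ (p.Prime ∧ p ∣ j) := by
            rintro ⟨-, hdj⟩
            apply hmem
            have hpj : p ≤ j := Nat.le_of_dvd (by omega) hdj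
            rw [PySem.List.mem_pyRange_iff_of_pos hstep]
            refine ⟨by exact_mod_cast hpj, by exact_mod_cast (by omega : j < n + 1), ?_⟩
            have hd : (p : Int) ∣ (j : Int) := by exact_mod_cast hdj
            exact dvd_sub hd (dvd_refl _)
          simp only [avalF, if_neg hj0, aval, pdiv_succ_of_not p j (by omega) hnd]
    · have hm1 : ((List.range (n + 1)).map (fun k => avalF (p - 1) k))[j]? = none := by
        simp; omega
      have hm2 : ((List.range (n + 1)).map (fun k => avalF p k))[j]? = none := by
        simp; omega
      rw [hm1, hm2, if_neg ?hnm]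
      case hnm =>
        intro hmem
        obtain ⟨-, hj2, -⟩ := (PySem.List.mem_pyRange_iff_of_pos hstep _).mp hmem
        omega
  · rw [if_neg (fun h => hp ((aval_self_eq_one_iff p h2).mp h))]
    apply List.map_congr_left
    intro k _
    by_cases hk0 : k = 0
    · subst hk0; rfl
    · simp only [avalF, if_neg hk0, aval,
        pdiv_succ_of_not p k (by omega) (fun h => hp h.1)]

lemma A_loop (n : ℕ) : ∀ m : ℕ, m + 2 ≤ n + 1 →
    (PySem.List.pyRange 2 ((m : Int) + 2) 1).foldl (A_outer (n : Int))
        (List.replicate (n + 1) 1)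
      = (List.range (n + 1)).map (fun k => avalF (m + 1) k) := by
  intro m
  induction m with
  | zero =>
    intro _
    rw [show ((0 : ℕ) : Int) + 2 = 2 by norm_num, PySem.List.pyRange_one_eq_nil le_rfl,
        List.foldl_nil]
    have hcongr : ∀ k ∈ List.range (n + 1), avalF 1 k = (fun _ : ℕ => (1 : Int)) k := by
      intro k _
      by_cases hk0 : k = 0
      · subst hk0; rfl
      · simp only [avalF, if_neg hk0, aval, if_pos (pdiv_one k)]
    rw [List.map_congr_left hcongr, List.map_const', List.length_range]
  | succ m ih =>
    intro h
    have hb : ((m + 1 : ℕ) : Int) + 2 = ((m : Int) + 2) + 1 := by push_cast; ring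
    rw [hb, PySem.List.pyRange_one_succ_right (by omega), List.foldl_append, ih (by omega),
        List.foldl_cons, List.foldl_nil]
    have hcast : ((m : Int) + 2) = ((m + 2 : ℕ) : Int) := by push_cast; ring
    have hstep := stepA_main n (m + 2) (by omega) (by omega)
    have hm1 : m + 2 - 1 = m + 1 := by omega
    rw [hm1] at hstep
    rw [hcast, hstep]

lemma stepB_main (n i : ℕ) (h1 : 1 ≤ i) (hin : i ≤ n) :
    B_inner (n : Int) (i : Int) ((List.range (n + 1)).map (fun k => bval (i - 1) k))
      = (List.range (n + 1)).map (fun k => bval i k) := by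
  have hstep : (0 : Int) < (i : Int) := by positivity
  have hlen : ((List.range (n + 1)).map (fun k => bval (i - 1) k)).length = n + 1 := by simp
  have hread : PySem.List.pyGetD ((List.range (n + 1)).map (fun k => bval (i - 1) k)) (i : Int) 0
      = (i.totient : Int) := by
    rw [PySem.List.pyGetD_eq_getElem _ 0 (by positivity)
        (by rw [hlen]; exact_mod_cast Nat.lt_succ_of_le hin)]
    have ht : ((i : ℕ) : Int).toNat = i := by omega
    simp only [ht, List.getElem_map, List.getElem_range]
    exact bval_eq_totient (i - 1) i h1 (by omega)
  have hgt : ∀ j ∈ PySem.List.pyRange (2 * (i : Int)) ((n : Int) + 1) (i : Int),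
      (i : Int) < j := by
    intro j hj
    obtain ⟨hj1, -, -⟩ := (PySem.List.mem_pyRange_iff_of_pos hstep j).mp hj
    omega
  rw [B_inner, foldl_sub_const (i : Int) (by positivity) _ _ hgt, hread,
      PySem.List.foldl_congr_mem _
        (fun s j => PySem.List.pySetD s j (PySem.List.pyGetD s j 0 - (i.totient : Int)))
        (fun s j => PySem.List.pySetD s j (gB (i.totient : Int) j (PySem.List.pyGetD s j 0)))
        _ (fun acc x _ => rfl)]
  apply List.ext_getElem?
  intro j
  have hval : ∀ x ∈ PySem.List.pyRange (2 * (i : Int)) ((n : Int) + 1) (i : Int),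
      0 ≤ x ∧ x.toNat < ((List.range (n + 1)).map (fun k => bval (i - 1) k)).length := by
    intro x hx
    obtain ⟨hx1, hx2, -⟩ := (PySem.List.mem_pyRange_iff_of_pos hstep x).mp hx
    exact ⟨by omega, by rw [hlen]; omega⟩
  rw [batch_char (gB (i.totient : Int)) _ _ (nodup_pyRange_pos _ _ _ hstep) hval j]
  by_cases hj : j < n + 1
  · have hm1 : ((List.range (n + 1)).map (fun k => bval (i - 1) k))[j]?
        = some (bval (i - 1) j) := by simp [hj]
    have hm2 : ((List.range (n + 1)).map (fun k => bval i k))[j]?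
        = some (bval i j) := by simp [hj]
    rw [hm1, hm2]
    by_cases hmem : (j : Int) ∈ PySem.List.pyRange (2 * (i : Int)) ((n : Int) + 1) (i : Int)
    · obtain ⟨hj1, hj2, hj3⟩ := (PySem.List.mem_pyRange_iff_of_pos hstep _).mp hmem
      have hij : i ∣ j := by
        have hd : (i : Int) ∣ (j : Int) := by
          have h5 : (i : Int) ∣ 2 * (i : Int) := Dvd.intro 2 (by ring)
          have h6 := dvd_add hj3 h5
          simpa using h6
        exact_mod_cast hd
      have h2i : 2 * i ≤ j := by exact_mod_cast hj1
      rw [if_pos hmem]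
      simp only [Option.map_some]
      congr 1
      rw [gB, stepB_val i j h1 hij h2i]
    · rw [if_neg hmem]
      congr 1
      by_cases hj0 : j = 0
      · subst hj0; rfl
      · refine (bval_succ_of_not i j h1 ?_).symm
        rintro ⟨hdj, hne⟩
        apply hmem
        obtain ⟨t, ht⟩ := hdj
        have ht2 : 2 ≤ t := by
          rcases Nat.lt_or_ge t 2 with h' | h'
          · interval_cases t <;> omega
          · exact h'
        have h2ij : 2 * i ≤ j := by rw [ht]; nlinarith
        rw [PySem.List.mem_pyRange_iff_of_pos hstep]
        refine ⟨by exact_mod_cast h2ij, by exact_mod_cast (by omega : j < n + 1), ?_⟩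
        have hd : (i : Int) ∣ (j : Int) := ⟨(t : Int), by exact_mod_cast ht⟩
        exact dvd_sub hd (Dvd.intro 2 (by ring))
  · have hm1 : ((List.range (n + 1)).map (fun k => bval (i - 1) k))[j]? = none := by
      simp; omega
    have hm2 : ((List.range (n + 1)).map (fun k => bval i k))[j]? = none := by
      simp; omega
    rw [hm1, hm2, if_neg ?hnm]
    case hnm =>
      intro hmem
      obtain ⟨-, hj2, -⟩ := (PySem.List.mem_pyRange_iff_of_pos hstep _).mp hmem
      omega

lemma B_loop (n : ℕ) : ∀ m : ℕ, m ≤ n →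
    (PySem.List.pyRange 1 ((m : Int) + 1) 1).foldl (fun phi i => B_inner (n : Int) i phi)
        (1 :: PySem.List.pyRange 1 ((n : Int) + 1) 1)
      = (List.range (n + 1)).map (fun k => bval m k) := by
  intro m
  induction m with
  | zero =>
    intro _
    rw [show ((0 : ℕ) : Int) + 1 = 1 by norm_num, PySem.List.pyRange_one_eq_nil le_rfl,
        List.foldl_nil, PySem.List.pyRange_one 1 ((n : Int) + 1)]
    have hn : (((n : Int) + 1) - 1).toNat = n := by omega
    rw [hn, List.range_succ_eq_map, List.map_cons, List.map_map]
    congr 1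
    apply List.map_congr_left
    intro k _
    show (1 : Int) + (k : Int) = bval 0 (k + 1)
    rw [bval_zero (k + 1) (by omega)]
    push_cast
    ring
  | succ m ih =>
    intro h
    have hb : ((m + 1 : ℕ) : Int) + 1 = ((m : Int) + 1) + 1 := by push_cast; ring
    rw [hb, PySem.List.pyRange_one_succ_right (a := 1) (b := (m : Int) + 1) (by omega),
        List.foldl_append, ih (by omega), List.foldl_cons, List.foldl_nil]
    have hcast : ((m : Int) + 1) = ((m + 1 : ℕ) : Int) := by push_cast; ring
    have hstep := stepB_main n (m + 1) (by omega) (by omega)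
    have hm1 : m + 1 - 1 = m := by omega
    rw [hm1] at hstep
    rw [hcast, hstep]

lemma A_eval (n : ℕ) : all_totient (n : Int) = (List.range (n + 1)).map tgt := by
  match n with
  | 0 => decide
  | 1 => decide
  | (m + 2) =>
    rw [all_totient]
    have htoNat : (((m + 2 : ℕ) : Int) + 1).toNat = m + 2 + 1 := by omega
    rw [htoNat]
    have hA := A_loop (m + 2) (m + 1) (by omega)
    have hbb : ((m + 1 : ℕ) : Int) + 2 = ((m + 2 : ℕ) : Int) + 1 := by push_cast; ring
    rw [hbb] at hA
    rw [hA]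
    apply List.map_congr_left
    intro k hk
    have hk' : k < m + 2 + 1 := List.mem_range.mp hk
    by_cases hk0 : k = 0
    · subst hk0; rfl
    · by_cases hk1 : k = 1
      · subst hk1
        show avalF (m + 1 + 1) 1 = tgt 1
        simp only [avalF, tgt, if_neg (by omega : ¬ (1 : ℕ) = 0), aval_one,
          Nat.totient_one, Nat.cast_one]
      · simp only [avalF, tgt, if_neg hk0]
        exact aval_final (m + 1 + 1) k (by omega) (by omega)

lemma B_eval (n : ℕ) : all_totient_alt (n : Int) = (List.range (n + 1)).map tgt := by
  rw [all_totient_alt, if_neg (by omega : ¬ ((n : ℕ) : Int) < 0), B_loop n n le_rfl]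
  apply List.map_congr_left
  intro k hk
  have hk' : k < n + 1 := List.mem_range.mp hk
  by_cases hk0 : k = 0
  · subst hk0; rfl
  · rw [bval_eq_totient n k (by omega) (by omega)]
    simp only [tgt, if_neg hk0]

-- ===== VERDICT (by name: the statement is the Claim_ definition above) =====
theorem all_totient_spec : Claim_equal_all_totient := by
  intro n _
  unfold Spec_all_totient
  by_cases h : 0 ≤ n
  · obtain ⟨m, rfl⟩ := Int.eq_ofNat_of_zero_le h
    rw [A_eval, B_eval]
  · have hlt : n < 0 := by omega
    have h1 : (n + 1 : Int) ≤ 2 := by omega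
    have h2 : ((n + 1 : Int)).toNat = 0 := by omega
    rw [all_totient, all_totient_alt, if_pos hlt, PySem.List.pyRange_one_eq_nil h1, h2]
    rfl
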